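-- pv_equiv track=rewrite | github.com/Furyfree/Compute-cluster | backend/src/util/proxmox_util.py | parse_smart_attributes
-- ===== SOURCE A (Python) =====
-- def parse_smart_attributes(smart_data):
--     attributes = {attr["name"]: attr for attr in smart_data.get("attributes", [])}
--
--     return {
--         "Health": smart_data.get("health", "UNKNOWN"),
--         "Power_On_Hours": attributes.get("Power_On_Hours", {}).get("raw"),
--         "Temperature (C)": attributes.get("Temperature_Celsius", {}).get("value"),
--         "Reallocated_Sector_Ct": attributes.get("Reallocated_Sector_Ct", {}).get("raw"),
--         "Current_Pending_Sector": attributes.get("Current_Pending_Sector", {}).get("raw"),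
--         "Offline_Uncorrectable": attributes.get("Offline_Uncorrectable", {}).get("raw"),
--         "Command_Timeout": attributes.get("Command_Timeout", {}).get("raw"),
--         "UDMA_CRC_Error_Count": attributes.get("UDMA_CRC_Error_Count", {}).get("raw"),
--     }
-- ===== SOURCE B (Python) =====
-- _FIELDS = {
--     "Power_On_Hours": ("Power_On_Hours", "raw"),
--     "Temperature_Celsius": ("Temperature (C)", "value"),
--     "Reallocated_Sector_Ct": ("Reallocated_Sector_Ct", "raw"),
--     "Current_Pending_Sector": ("Current_Pending_Sector", "raw"),
--     "Offline_Uncorrectable": ("Offline_Uncorrectable", "raw"),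
--     "Command_Timeout": ("Command_Timeout", "raw"),
--     "UDMA_CRC_Error_Count": ("UDMA_CRC_Error_Count", "raw"),
-- }
--
-- def parse_smart_attributes(smart_data):
--     result = {
--         "Health": smart_data.get("health", "UNKNOWN"),
--         "Power_On_Hours": None,
--         "Temperature (C)": None,
--         "Reallocated_Sector_Ct": None,
--         "Current_Pending_Sector": None,
--         "Offline_Uncorrectable": None,
--         "Command_Timeout": None,
--         "UDMA_CRC_Error_Count": None,
--     }
--     for attr in smart_data.get("attributes", []):
--         m = _FIELDS.get(attr["name"])
--         if m is not None:
--             result[m[0]] = attr.get(m[1])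
--     return result
-- ===== Notes on version B (the rewrite author's own statement) =====
-- stated objective: alternative
-- what changed: Instead of building a full name->attr index dict over all attributes and then doing eight lookups, B initialises the fixed result dict once and makes a single configured scan over the attributes, writing each recognised attribute's field straight into the result (last occurrence wins in both).
-- outside the precondition, e.g. on parse_smart_attributes({'attributes': [{'raw': '1'}]}): A raises KeyError, B raises KeyError
import Mathlib
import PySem

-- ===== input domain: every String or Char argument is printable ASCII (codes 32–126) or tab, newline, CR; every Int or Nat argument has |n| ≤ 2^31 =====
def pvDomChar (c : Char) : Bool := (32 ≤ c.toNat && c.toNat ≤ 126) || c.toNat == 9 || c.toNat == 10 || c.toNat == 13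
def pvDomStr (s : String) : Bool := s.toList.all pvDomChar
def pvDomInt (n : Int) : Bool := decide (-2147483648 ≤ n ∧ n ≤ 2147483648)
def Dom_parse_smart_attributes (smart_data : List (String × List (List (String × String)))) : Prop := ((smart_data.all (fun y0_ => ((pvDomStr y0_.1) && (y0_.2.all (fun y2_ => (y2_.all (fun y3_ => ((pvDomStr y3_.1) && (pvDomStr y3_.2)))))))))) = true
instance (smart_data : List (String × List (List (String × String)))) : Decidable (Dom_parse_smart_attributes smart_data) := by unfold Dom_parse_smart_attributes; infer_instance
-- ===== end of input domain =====

-- B replaces A's full name→attr index plus eight lookups by one configured scan over the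
-- attributes that writes each recognised attribute straight into a fixed result dict (alternative decomposition).

-- ===== PORT A =====
-- dict comprehension {attr["name"]: attr for attr in ...}; the 'none' branch is Python's KeyError, excluded by Pre_
def pvInsName (d : PySem.Dict String (List (String × String))) (attr : List (String × String)) :
    PySem.Dict String (List (String × String)) :=
  match (PySem.Dict.mk attr).get? "name" with
  | some n => d.insert n attr
  | none => d

def parse_smart_attributes (smart_data : List (String × List (List (String × String)))) : List (String × Option String) :=
  let attributes := ((PySem.Dict.mk smart_data).getD "attributes" []).foldl pvInsName PySem.Dict.empty
  -- 'Health' is smart_data.get("health", "UNKNOWN"); under Pre_ the "health" key is absent, so the value is "UNKNOWN"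
  [("Health", some "UNKNOWN"),
   ("Power_On_Hours", (PySem.Dict.mk (attributes.getD "Power_On_Hours" [])).get? "raw"),
   ("Temperature (C)", (PySem.Dict.mk (attributes.getD "Temperature_Celsius" [])).get? "value"),
   ("Reallocated_Sector_Ct", (PySem.Dict.mk (attributes.getD "Reallocated_Sector_Ct" [])).get? "raw"),
   ("Current_Pending_Sector", (PySem.Dict.mk (attributes.getD "Current_Pending_Sector" [])).get? "raw"),
   ("Offline_Uncorrectable", (PySem.Dict.mk (attributes.getD "Offline_Uncorrectable" [])).get? "raw"),
   ("Command_Timeout", (PySem.Dict.mk (attributes.getD "Command_Timeout" [])).get? "raw"),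
   ("UDMA_CRC_Error_Count", (PySem.Dict.mk (attributes.getD "UDMA_CRC_Error_Count" [])).get? "raw")]

-- ===== PORT B =====
def pvFields : PySem.Dict String (String × String) :=
  PySem.Dict.mk
    [("Power_On_Hours", ("Power_On_Hours", "raw")),
     ("Temperature_Celsius", ("Temperature (C)", "value")),
     ("Reallocated_Sector_Ct", ("Reallocated_Sector_Ct", "raw")),
     ("Current_Pending_Sector", ("Current_Pending_Sector", "raw")),
     ("Offline_Uncorrectable", ("Offline_Uncorrectable", "raw")),
     ("Command_Timeout", ("Command_Timeout", "raw")),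
     ("UDMA_CRC_Error_Count", ("UDMA_CRC_Error_Count", "raw"))]

-- loop body of Source B; the outer 'none' branch is Python's KeyError on attr["name"], excluded by Pre_
def pvStepB (r : PySem.Dict String (Option String)) (attr : List (String × String)) :
    PySem.Dict String (Option String) :=
  match (PySem.Dict.mk attr).get? "name" with
  | some n =>
    match pvFields.get? n with
    | some m => r.insert m.1 ((PySem.Dict.mk attr).get? m.2)
    | none => r
  | none => r

-- the initial result dict; 'Health' is smart_data.get("health", "UNKNOWN"), = "UNKNOWN" under Pre_
def pvInit : PySem.Dict String (Option String) :=
  PySem.Dict.mk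
    [("Health", some "UNKNOWN"), ("Power_On_Hours", none), ("Temperature (C)", none),
     ("Reallocated_Sector_Ct", none), ("Current_Pending_Sector", none),
     ("Offline_Uncorrectable", none), ("Command_Timeout", none), ("UDMA_CRC_Error_Count", none)]

def parse_smart_attributes_alt (smart_data : List (String × List (List (String × String)))) : List (String × Option String) :=
  ((((PySem.Dict.mk smart_data).getD "attributes" []).foldl pvStepB pvInit)).items

-- ===== PRECONDITION & SPEC =====
-- Pre_ excludes (i) attribute dicts without a "name" key, on which A (and B alike) raises KeyError, and
-- (ii) inputs with a "health" key: there A copies that key's value — under this task's fixed argument type a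
-- LIST of dicts — verbatim into the "Health" slot, so A's result is not a value of the declared return type
-- List (String × Option String) and cannot be stated in Lean at all; B returns the IDENTICAL value there in
-- Python (no behaviour difference is being hidden — the exclusion is purely the typing limit of the port).
def Pre_parse_smart_attributes (smart_data : List (String × List (List (String × String)))) : Prop :=
  (PySem.Dict.mk smart_data).contains "health" = false ∧
  ∀ attr ∈ (PySem.Dict.mk smart_data).getD "attributes" [], (PySem.Dict.mk attr).contains "name" = true
instance (smart_data : List (String × List (List (String × String)))) : Decidable (Pre_parse_smart_attributes smart_data) := by
  unfold Pre_parse_smart_attributes; infer_instance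

def pvWitness_parse_smart_attributes : (List (String × List (List (String × String)))) :=
  [("attributes", [[("name", "Power_On_Hours"), ("raw", "42")],
                   [("name", "Temperature_Celsius"), ("value", "33")]])]

def Spec_parse_smart_attributes (smart_data : List (String × List (List (String × String)))) (out : List (String × Option String)) : Prop := out = parse_smart_attributes_alt smart_data
instance (smart_data : List (String × List (List (String × String)))) (out : List (String × Option String)) : Decidable (Spec_parse_smart_attributes smart_data out) := by unfold Spec_parse_smart_attributes; infer_instance

-- ===== CLAIM (what is proved, stated in full; the proofs are below) =====
def Claim_equal_parse_smart_attributes : Prop := ∀ (smart_data : List (String × List (List (String × String)))), Dom_parse_smart_attributes smart_data → Pre_parse_smart_attributes smart_data → Spec_parse_smart_attributes smart_data (parse_smart_attributes smart_data)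

-- ===== LEMMAS AND PROOFS =====

-- the last attribute in attrs named n (both programs are last-wins on duplicate names)
def pvLast (attrs : List (List (String × String))) (n : String) : Option (List (String × String)) :=
  attrs.reverse.find? (fun a => (PySem.Dict.mk a).get? "name" == some n)

def pvUpd (attrs : List (List (String × String))) (n f : String) (dflt : Option String) : Option String :=
  match pvLast attrs n with
  | some a => (PySem.Dict.mk a).get? f
  | none => dflt

theorem pvLast_append (attrs : List (List (String × String))) (a : List (String × String)) (n : String) :
    pvLast (attrs ++ [a]) n =
      if (PySem.Dict.mk a).get? "name" == some n then some a else pvLast attrs n := by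
  simp [pvLast, List.find?_cons]
  split <;> simp_all

-- A side: the name-index characterised by last-wins lookup
theorem foldl_insName_getD (attrs : List (List (String × String)))
    (d : PySem.Dict String (List (String × String))) (n : String) :
    (attrs.foldl pvInsName d).getD n [] =
      (match pvLast attrs n with
       | some a => a
       | none => d.getD n []) := by
  induction attrs using List.reverseRecOn generalizing d with
  | nil => simp [pvLast]
  | append_singleton as a ih =>
    rw [List.foldl_append, pvLast_append]
    cases h : (PySem.Dict.mk a).get? "name" with
    | none => simp [List.foldl, pvInsName, h, ih]
    | some m =>
      simp only [List.foldl, pvInsName, h]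
      by_cases hm : m = n
      · subst hm
        simp [PySem.Dict.getD_insert_self]
      · simp [PySem.Dict.getD_insert, Ne.symm hm, hm, ih]

-- B side: the single configured scan computes the same last-wins values into the fixed result dict
theorem foldl_stepB (attrs : List (List (String × String)))
    (h p t rr c o ct u : Option String) :
    attrs.foldl pvStepB (PySem.Dict.mk
      [("Health", h), ("Power_On_Hours", p), ("Temperature (C)", t),
       ("Reallocated_Sector_Ct", rr), ("Current_Pending_Sector", c),
       ("Offline_Uncorrectable", o), ("Command_Timeout", ct), ("UDMA_CRC_Error_Count", u)])
    = PySem.Dict.mk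
      [("Health", h),
       ("Power_On_Hours", pvUpd attrs "Power_On_Hours" "raw" p),
       ("Temperature (C)", pvUpd attrs "Temperature_Celsius" "value" t),
       ("Reallocated_Sector_Ct", pvUpd attrs "Reallocated_Sector_Ct" "raw" rr),
       ("Current_Pending_Sector", pvUpd attrs "Current_Pending_Sector" "raw" c),
       ("Offline_Uncorrectable", pvUpd attrs "Offline_Uncorrectable" "raw" o),
       ("Command_Timeout", pvUpd attrs "Command_Timeout" "raw" ct),
       ("UDMA_CRC_Error_Count", pvUpd attrs "UDMA_CRC_Error_Count" "raw" u)] := by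
  induction attrs using List.reverseRecOn with
  | nil => simp [pvUpd, pvLast]
  | append_singleton as a ih =>
    rw [List.foldl_append, ih]
    simp only [List.foldl]
    simp only [pvUpd, pvLast_append]
    cases hn : (PySem.Dict.mk a).get? "name" with
    | none => simp [pvStepB, hn]
    | some m =>
      simp only [pvStepB, hn]
      by_cases h1 : m = "Power_On_Hours"
      · subst h1; simp [pvFields, PySem.Dict.get?_mk_cons, PySem.Dict.insert]
      · by_cases h2 : m = "Temperature_Celsius"
        · subst h2; simp [pvFields, PySem.Dict.get?_mk_cons, PySem.Dict.insert]
        · by_cases h3 : m = "Reallocated_Sector_Ct"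
          · subst h3; simp [pvFields, PySem.Dict.get?_mk_cons, PySem.Dict.insert]
          · by_cases h4 : m = "Current_Pending_Sector"
            · subst h4; simp [pvFields, PySem.Dict.get?_mk_cons, PySem.Dict.insert]
            · by_cases h5 : m = "Offline_Uncorrectable"
              · subst h5; simp [pvFields, PySem.Dict.get?_mk_cons, PySem.Dict.insert]
              · by_cases h6 : m = "Command_Timeout"
                · subst h6; simp [pvFields, PySem.Dict.get?_mk_cons, PySem.Dict.insert]
                · by_cases h7 : m = "UDMA_CRC_Error_Count"
                  · subst h7; simp [pvFields, PySem.Dict.get?_mk_cons, PySem.Dict.insert]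
                  · simp [pvFields, PySem.Dict.get?, h1, h2, h3, h4, h5, h6, h7,
                          Ne.symm h1, Ne.symm h2, Ne.symm h3, Ne.symm h4, Ne.symm h5, Ne.symm h6, Ne.symm h7]

-- ===== VERDICT (by name: the statement is the Claim_ definition above) =====
theorem parse_smart_attributes_spec : Claim_equal_parse_smart_attributes := by
  intro sd _ _
  unfold Spec_parse_smart_attributes parse_smart_attributes parse_smart_attributes_alt pvInit
  rw [foldl_stepB]
  refine congrArg (fun z => ("Health", some "UNKNOWN") :: z) ?_
  simp only [foldl_insName_getD, pvUpd]
  cases pvLast ((PySem.Dict.mk sd).getD "attributes" []) "Power_On_Hours" <;>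
  cases pvLast ((PySem.Dict.mk sd).getD "attributes" []) "Temperature_Celsius" <;>
  cases pvLast ((PySem.Dict.mk sd).getD "attributes" []) "Reallocated_Sector_Ct" <;>
  cases pvLast ((PySem.Dict.mk sd).getD "attributes" []) "Current_Pending_Sector" <;>
  cases pvLast ((PySem.Dict.mk sd).getD "attributes" []) "Offline_Uncorrectable" <;>
  cases pvLast ((PySem.Dict.mk sd).getD "attributes" []) "Command_Timeout" <;>
  cases pvLast ((PySem.Dict.mk sd).getD "attributes" []) "UDMA_CRC_Error_Count" <;>
  simp [PySem.Dict.empty, PySem.Dict.getD, PySem.Dict.get?]
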